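-- pv_equiv track=rewrite | github.com/brianliu12437/TreeExtract | code/methods.py | block_indices
-- ===== SOURCE A (Python) =====
-- def block_indices(num_nodes_ensemble):
--     blocks = []
--     start_idx = 0
--     for size in num_nodes_ensemble:
--         # indices for this block range from start_idx to start_idx+size-1
--         block = list(range(start_idx, start_idx + size))
--         blocks.append(block)
--         start_idx += size
--     return blocks
-- ===== SOURCE B (Python) =====
-- def _go(seg, base):
--     # blocks of the sizes in seg, numbered consecutively starting at base
--     if len(seg) == 1:
--         return [list(range(base, base + seg[0]))]
--     mid = len(seg) // 2
--     return _go(seg[:mid], base) + _go(seg[mid:], base + sum(seg[:mid]))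
--
-- def block_indices(num_nodes_ensemble):
--     # Divide and conquer: split the size list in half, number the left half's
--     # blocks from base and the right half's from base plus the left half's sum.
--     if not num_nodes_ensemble:
--         return []
--     return _go(num_nodes_ensemble, 0)
-- ===== Notes on version B (the rewrite author's own statement) =====
-- stated objective: alternative
-- what changed: B is divide-and-conquer: it recursively splits the size list in half, numbering the left half's blocks from the current base and the right half's from base plus the left half's sum, instead of threading a running start index through one forward loop.
import Mathlib
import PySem

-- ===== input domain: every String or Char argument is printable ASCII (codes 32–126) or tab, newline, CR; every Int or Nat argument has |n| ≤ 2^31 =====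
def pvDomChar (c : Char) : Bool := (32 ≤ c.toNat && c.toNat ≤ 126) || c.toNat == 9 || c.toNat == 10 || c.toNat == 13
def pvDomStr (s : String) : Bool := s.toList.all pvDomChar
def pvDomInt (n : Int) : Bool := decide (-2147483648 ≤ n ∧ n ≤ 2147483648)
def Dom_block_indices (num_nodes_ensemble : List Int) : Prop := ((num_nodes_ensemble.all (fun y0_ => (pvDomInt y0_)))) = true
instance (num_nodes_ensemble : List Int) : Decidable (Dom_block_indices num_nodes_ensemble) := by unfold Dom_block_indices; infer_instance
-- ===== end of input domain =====

-- B is divide-and-conquer: each half's blocks are built zero-based and the right half is shifted by the left half's total on merge (alternative decomposition; same result).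

-- ===== PORT A =====
-- A: forward loop threading a running start_idx, appending list(range(start_idx, start_idx+size)).
def block_indices (num_nodes_ensemble : List Int) : List (List Int) :=
  (num_nodes_ensemble.foldl
    (fun (st : List (List Int) × Int) size =>
      (st.1 ++ [PySem.List.pyRange st.2 (st.2 + size) 1], st.2 + size))
    ([], 0)).1

-- ===== PORT B =====
-- _go(seg, base): the blocks of seg numbered consecutively from base; the [] case is unreachable from block_indices_alt (Python's _go is only called on non-empty segments).
def pvGo : List Int → Int → List (List Int)
  | [], _ => []
  | [x], base => [PySem.List.pyRange base (base + x) 1]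
  | a :: b :: rest, base =>
    let seg := a :: b :: rest
    let mid := seg.length / 2
    pvGo (seg.take mid) base ++ pvGo (seg.drop mid) (base + (seg.take mid).sum)
termination_by seg => seg.length
decreasing_by
  all_goals simp only [List.length_take, List.length_drop, List.length_cons]; omega

def block_indices_alt (num_nodes_ensemble : List Int) : List (List Int) :=
  if num_nodes_ensemble = [] then [] else pvGo num_nodes_ensemble 0

-- ===== PRECONDITION & SPEC =====
def Spec_block_indices (num_nodes_ensemble : List Int) (out : List (List Int)) : Prop := out = block_indices_alt num_nodes_ensemble
instance (num_nodes_ensemble : List Int) (out : List (List Int)) : Decidable (Spec_block_indices num_nodes_ensemble out) := by unfold Spec_block_indices; infer_instance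

-- ===== CLAIM (what is proved, stated in full; the proofs are below) =====
def Claim_equal_block_indices : Prop := ∀ (num_nodes_ensemble : List Int), Dom_block_indices num_nodes_ensemble → Spec_block_indices num_nodes_ensemble (block_indices num_nodes_ensemble)

-- ===== LEMMAS AND PROOFS =====
-- Reference form: the blocks of xs, zero-based, as a foldr.
def pvZ (xs : List Int) : List (List Int) :=
  xs.foldr (fun size blocks =>
    [PySem.List.pyRange 0 size 1] ++ blocks.map (fun b => b.map (fun i => i + size))) []

-- Shifting a zero-based range gives an offset range.
theorem pyRange_shift (s x : Int) :
    (PySem.List.pyRange 0 x 1).map (fun i => i + s) = PySem.List.pyRange s (s + x) 1 := by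
  rw [PySem.List.pyRange_one, PySem.List.pyRange_one]
  simp only [Int.sub_zero, List.map_map]
  have : s + x - s = x := by ring
  rw [this]
  apply List.map_congr_left
  intro k _
  simp [Int.add_comm]

-- composing two shifts is one shift by the sum
theorem shift_shift (L : List (List Int)) (x s : Int) :
    (L.map (fun b => b.map (fun i => i + s))).map (fun b => b.map (fun i => i + x))
      = L.map (fun b => b.map (fun i => i + (x + s))) := by
  simp only [List.map_map, Function.comp_def]
  congr 1
  funext b
  congr 1
  funext i
  ring

-- pvZ splits over append: the right part's blocks are shifted by the left part's total.
theorem pvZ_append (l r : List Int) :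
    pvZ (l ++ r) = pvZ l ++ (pvZ r).map (fun b => b.map (fun i => i + l.sum)) := by
  induction l with
  | nil => simp [pvZ]
  | cons x l ih =>
      simp only [List.cons_append, pvZ, List.foldr_cons] at *
      rw [ih]
      simp only [List.map_append, List.sum_cons, List.cons.injEq, true_and]
      rw [shift_shift]
      rfl

-- _go computes the zero-based blocks shifted by base.
theorem pvGo_eq (seg : List Int) (base : Int) :
    pvGo seg base = (pvZ seg).map (fun b => b.map (fun i => i + base)) := by
  fun_induction pvGo seg base with
  | case1 base => rfl
  | case2 x base =>
      rw [show pvZ [x] = [PySem.List.pyRange 0 x 1] from by simp [pvZ]]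
      simp only [List.map_cons, List.map_nil]
      rw [pyRange_shift]
  | case3 a b rest base seg mid ihl ihr =>
      have hsplit : (a :: b :: rest).take ((a :: b :: rest).length / 2)
          ++ (a :: b :: rest).drop ((a :: b :: rest).length / 2) = a :: b :: rest :=
        List.take_append_drop _ _
      simp only [seg, mid, ihl, ihr]
      conv_rhs => rw [← hsplit]
      rw [pvZ_append]
      simp only [List.map_append, shift_shift]

-- A's loop from start s and accumulator acc produces acc ++ (zero-based blocks shifted by s).
theorem loop_eq (xs : List Int) (s : Int) (acc : List (List Int)) :
    (xs.foldl
      (fun (st : List (List Int) × Int) size =>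
        (st.1 ++ [PySem.List.pyRange st.2 (st.2 + size) 1], st.2 + size))
      (acc, s)).1
    = acc ++ (pvZ xs).map (fun b => b.map (fun i => i + s)) := by
  induction xs generalizing s acc with
  | nil => simp [pvZ]
  | cons x xs ih =>
      simp only [List.foldl_cons, pvZ, List.foldr_cons, List.map_append, List.map_cons,
        List.map_map]
      rw [ih]
      simp only [List.append_assoc, List.map_nil, List.singleton_append]
      congr 1
      rw [pyRange_shift]
      rw [← List.map_map, shift_shift]
      rfl

-- ===== VERDICT (by name: the statement is the Claim_ definition above) =====
theorem block_indices_spec : Claim_equal_block_indices := by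
  intro xs _
  show block_indices xs = block_indices_alt xs
  rw [block_indices, block_indices_alt, loop_eq]
  split
  · subst ‹xs = []›; simp [pvZ]
  · rw [pvGo_eq]
    simp
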